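-- pv_equiv track=rewrite | github.com/johansen23213/invest_value_manager | tools/command_center.py | get_geography
-- ===== SOURCE A (Python) =====
-- def get_geography(ticker):
--     suffix_map = {
--         '.DE': 'Germany', '.PA': 'France', '.MI': 'Italy', '.L': 'UK',
--         '.AS': 'Netherlands', '.BR': 'Belgium', '.MC': 'Spain',
--         '.HE': 'Finland', '.SW': 'Switzerland', '.CO': 'Denmark',
--     }
--     for suffix, country in suffix_map.items():
--         if ticker.endswith(suffix):
--             return country
--     return 'US'
-- ===== SOURCE B (Python) =====
-- def get_geography(ticker):
--     suffix_map = {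
--         '.DE': 'Germany', '.PA': 'France', '.MI': 'Italy', '.L': 'UK',
--         '.AS': 'Netherlands', '.BR': 'Belgium', '.MC': 'Spain',
--         '.HE': 'Finland', '.SW': 'Switzerland', '.CO': 'Denmark',
--     }
--     head, sep, tail = ticker.rpartition('.')
--     if not sep:
--         return 'US'
--     return suffix_map.get('.' + tail, 'US')
-- ===== Notes on version B (the rewrite author's own statement) =====
-- stated objective: simpler
-- what changed: Replaces the endswith scan over all ten suffixes by splitting off the last dot-component with rpartition and doing one direct dict lookup.
import Mathlib
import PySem

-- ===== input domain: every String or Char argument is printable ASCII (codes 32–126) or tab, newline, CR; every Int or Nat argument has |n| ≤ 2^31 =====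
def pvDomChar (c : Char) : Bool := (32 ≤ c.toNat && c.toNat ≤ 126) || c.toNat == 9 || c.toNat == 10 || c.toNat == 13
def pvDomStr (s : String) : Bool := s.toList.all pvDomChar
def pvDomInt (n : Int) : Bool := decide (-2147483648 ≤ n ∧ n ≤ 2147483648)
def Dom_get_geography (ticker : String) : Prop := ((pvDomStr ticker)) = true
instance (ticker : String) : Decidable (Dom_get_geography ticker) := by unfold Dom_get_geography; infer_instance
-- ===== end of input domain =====

-- B replaces A's endswith scan over the ten suffixes by one rpartition split and a single
-- direct lookup of the last dot-component (objective: simpler).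

-- ===== PORT A =====
-- suffix_map.items() in insertion order
def pvSuffixMap : List (String × String) :=
  [(".DE", "Germany"), (".PA", "France"), (".MI", "Italy"), (".L", "UK"),
   (".AS", "Netherlands"), (".BR", "Belgium"), (".MC", "Spain"),
   (".HE", "Finland"), (".SW", "Switzerland"), (".CO", "Denmark")]

-- the for-loop over suffix_map.items() with early return
def pvScan (ticker : String) : List (String × String) → String
  | [] => "US"
  | (s, c) :: rest => if PySem.Str.endswith ticker s then c else pvScan ticker rest

def get_geography (ticker : String) : String := pvScan ticker pvSuffixMap

-- ===== PORT B =====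
-- B's suffix_map, each key '.XY' spelled as its character list (same keys, same order)
def pvSuffixKeys : List (List Char × String) :=
  [(['.','D','E'], "Germany"), (['.','P','A'], "France"), (['.','M','I'], "Italy"), (['.','L'], "UK"),
   (['.','A','S'], "Netherlands"), (['.','B','R'], "Belgium"), (['.','M','C'], "Spain"),
   (['.','H','E'], "Finland"), (['.','S','W'], "Switzerland"), (['.','C','O'], "Denmark")]

-- ticker.rpartition('.') ported by hand (exact on every input): the tail of rpartition is the
-- maximal '.'-free suffix of the string, i.e. reversed it is takeWhile (· ≠ '.') of the reversed
-- characters, and sep is empty exactly when that suffix is the whole string.  Then, as in Source B,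
-- one direct lookup of '.' + tail (suffix_map.get with default 'US').
def get_geography_alt (ticker : String) : String :=
  let rev := ticker.toList.reverse
  let tailRev := rev.takeWhile (· ≠ '.')
  if tailRev.length = rev.length then "US"
  else ((pvSuffixKeys.lookup ('.' :: tailRev.reverse)).getD "US")

-- ===== PRECONDITION & SPEC =====
def Spec_get_geography (ticker : String) (out : String) : Prop := out = get_geography_alt ticker
instance (ticker : String) (out : String) : Decidable (Spec_get_geography ticker out) := by unfold Spec_get_geography; infer_instance

-- ===== CLAIM (what is proved, stated in full; the proofs are below) =====
def Claim_equal_get_geography : Prop := ∀ (ticker : String), Dom_get_geography ticker → Spec_get_geography ticker (get_geography ticker)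

-- ===== LEMMAS AND PROOFS =====

theorem endswith_iff_rev (t s : String) :
    PySem.Str.endswith t s = true ↔ s.toList.reverse <+: t.toList.reverse := by
  rw [PySem.Str.endswith_eq, PySem.Chars.endswith_iff]
  exact List.reverse_prefix.symm
theorem lookup_long (k : List Char) (h : 4 ≤ k.length) : pvSuffixKeys.lookup k = none := by
  rcases k with _ | ⟨a, _ | ⟨b, _ | ⟨c, _ | ⟨d, t⟩⟩⟩⟩ <;>
    simp_all [pvSuffixKeys, List.lookup]
set_option maxHeartbeats 1000000 in
theorem main_eq (t : String) : get_geography t = get_geography_alt t := by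
  unfold get_geography get_geography_alt
  simp only [pvScan, pvSuffixMap, endswith_iff_rev]
  rw [show ".DE".toList.reverse = ['E', 'D', '.'] from by decide, show ".PA".toList.reverse = ['A', 'P', '.'] from by decide, show ".MI".toList.reverse = ['I', 'M', '.'] from by decide, show ".L".toList.reverse = ['L', '.'] from by decide, show ".AS".toList.reverse = ['S', 'A', '.'] from by decide, show ".BR".toList.reverse = ['R', 'B', '.'] from by decide, show ".MC".toList.reverse = ['C', 'M', '.'] from by decide, show ".HE".toList.reverse = ['E', 'H', '.'] from by decide, show ".SW".toList.reverse = ['W', 'S', '.'] from by decide, show ".CO".toList.reverse = ['O', 'C', '.'] from by decide]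
  generalize t.toList.reverse = r
  rcases r with _ | ⟨a, _ | ⟨b, _ | ⟨c, rest⟩⟩⟩
  · simp
  · by_cases ha : a = '.' <;>
      simp_all [List.cons_prefix_cons, List.takeWhile_cons, List.lookup, pvSuffixKeys]
  · by_cases ha : a = '.' <;> by_cases hb : b = '.' <;>
      simp_all [List.cons_prefix_cons, List.takeWhile_cons, List.lookup, pvSuffixKeys] <;>
        first
        | rfl
        | tauto
        | (by_cases hL : a = 'L' <;> simp_all [beq_false_of_ne] <;> tauto)
  · by_cases ha : a = '.'
    · simp_all [List.cons_prefix_cons, List.lookup, pvSuffixKeys]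
    · by_cases hb : b = '.'
      · simp_all [List.cons_prefix_cons, List.takeWhile_cons, List.lookup, pvSuffixKeys] <;>
          first
          | rfl
          | tauto
          | (by_cases hL : a = 'L' <;> simp_all [beq_false_of_ne] <;> tauto)
      · by_cases hc : c = '.'
        · subst hc
          simp only [List.cons_prefix_cons, List.nil_prefix, List.takeWhile_cons, ha, hb,
            decide_true, ne_eq, not_false_eq_true, if_true, if_false]
          simp only [not_true, decide_false, Bool.false_eq_true, if_false, and_true, true_and,
            List.reverse_cons, List.reverse_nil, List.nil_append, List.cons_append,
            List.length_cons, List.length_nil, pvSuffixKeys, List.lookup]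
          simp only [if_neg (by omega : ¬ (0 + 1 + 1 = rest.length + 1 + 1 + 1))]
          split_ifs <;>
            first
            | rfl
            | (rename_i hpos
               obtain ⟨h1, h2⟩ := hpos
               subst h1; subst h2
               first | rfl | simp_all)
            | (repeat' split <;> simp_all)
        · have h4 : List.lookup ('.' :: (List.takeWhile (fun x => decide (x ≠ '.')) (a :: b :: c :: rest)).reverse) pvSuffixKeys = none := by
            apply lookup_long
            simp [ha, hb, hc]
          rw [h4]
          simp only [List.cons_prefix_cons, List.nil_prefix, and_true]
          have hc' : ('.' = c) = False := eq_false fun h => hc h.symm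
          have hb' : ('.' = b) = False := eq_false fun h => hb h.symm
          simp only [hc', hb', and_false, false_and, if_false, Option.getD_none, ite_self]

-- ===== VERDICT (by name: the statement is the Claim_ definition above) =====
theorem get_geography_spec : Claim_equal_get_geography := by
  intro t _
  unfold Spec_get_geography
  exact main_eq t
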